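-- pv_equiv track=rewrite | github.com/Rohit-raj96/project | parser.py | build_table_columns
-- ===== SOURCE A (Python) =====
-- def normalize_row(row_values: list[str], width: int) -> list[str]:
--     values = row_values[:width]
--     if len(values) < width:
--         values.extend([""] * (width - len(values)))
--     return values
--
-- def build_table_columns(header_rows: list[list[str]], body_rows: list[list[str]]) -> list[str]:
--     width = max((len(row) for row in header_rows + body_rows), default=0)
--     if width == 0:
--         return []
--
--     if not header_rows:
--         return [f"Column {index}" for index in range(1, width + 1)]
--
--     normalized_headers = [normalize_row(row, width) for row in header_rows]
--     columns: list[str] = []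
--     for index in range(width):
--         values = [row[index] for row in normalized_headers if row[index]]
--         columns.append(" / ".join(values) if values else f"Column {index + 1}")
--     return columns
-- ===== SOURCE B (Python) =====
-- def build_table_columns(header_rows: list[list[str]], body_rows: list[list[str]]) -> list[str]:
--     width = 0
--     for row in header_rows + body_rows:
--         if len(row) > width:
--             width = len(row)
--     if width == 0:
--         return []
--     if not header_rows:
--         return [f"Column {i}" for i in range(1, width + 1)]
--     columns = [[] for _ in range(width)]
--     for row in header_rows:
--         for i in range(width):
--             cell = row[i] if i < len(row) else ""
--             if cell:
--                 columns[i].append(cell)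
--     return [" / ".join(acc) if acc else f"Column {i + 1}" for i, acc in enumerate(columns)]
-- ===== Notes on version B (the rewrite author's own statement) =====
-- stated objective: alternative
-- what changed: Replaces the normalize-every-row-then-column-major extraction with a row-major single pass over the original header rows that maintains per-column accumulator lists (no normalization helper, no per-column rescan of the headers); width is computed by a running-max loop instead of max(..., default=0).
import Mathlib
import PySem

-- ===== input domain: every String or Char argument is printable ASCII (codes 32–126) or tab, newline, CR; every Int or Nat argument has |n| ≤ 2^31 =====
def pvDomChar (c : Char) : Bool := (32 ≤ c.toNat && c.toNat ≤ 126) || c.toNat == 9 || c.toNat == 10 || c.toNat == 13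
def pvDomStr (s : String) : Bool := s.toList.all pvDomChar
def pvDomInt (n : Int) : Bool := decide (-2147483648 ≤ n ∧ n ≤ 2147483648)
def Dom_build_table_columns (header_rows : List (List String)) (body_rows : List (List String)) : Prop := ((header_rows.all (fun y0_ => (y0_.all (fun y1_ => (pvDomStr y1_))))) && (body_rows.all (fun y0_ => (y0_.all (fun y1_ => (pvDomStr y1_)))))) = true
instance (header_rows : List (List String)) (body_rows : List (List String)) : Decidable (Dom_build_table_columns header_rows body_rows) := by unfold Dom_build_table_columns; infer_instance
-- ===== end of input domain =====

-- B replaces A's normalize-then-column-major extraction with one row-major pass keeping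
-- per-column accumulator lists (alternative decomposition, same cost). Return values only; no mutation.

-- ===== PORT A =====
-- normalize_row: row_values[:width] padded with "" up to width (width is a length here, so Nat; slice [:w] with w ≥ 0 is take)
def normalize_row (row_values : List String) (width : Nat) : List String :=
  let values := row_values.take width
  if values.length < width then values ++ List.replicate (width - values.length) "" else values

def build_table_columns (header_rows : List (List String)) (body_rows : List (List String)) : List String :=
  -- max((len(row) for row in header_rows + body_rows), default=0)
  let width : Nat :=
    (PySem.List.max? ((header_rows ++ body_rows).map (fun r => r.length)) (fun x => x)).getD 0
  if width = 0 then []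
  else if header_rows = [] then
    (PySem.List.pyRange 1 (Int.ofNat width + 1) 1).map (fun i => "Column " ++ PySem.Int.toStr i)
  else
    let normalized := header_rows.map (fun r => normalize_row r width)
    -- row[index] is exact as getD: every normalized row has length = width > index
    (List.range width).foldl (fun cols index =>
      let values := (normalized.filter (fun row => row.getD index "" ≠ "")).map (fun row => row.getD index "")
      cols ++ [if values ≠ [] then PySem.Str.join " / " values
               else "Column " ++ PySem.Int.toStr (Int.ofNat index + 1)]) []

-- ===== PORT B =====
-- inner loop of Source B: for i in range(width): append row[i]-or-"" to columns[i] if truthy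
-- (columns always has length width, so iterating columns with their indices is that loop)
def btc_step (cols : List (List String)) (row : List String) : List (List String) :=
  cols.zipIdx.map (fun p =>
    let cell := row.getD p.2 ""   -- row[i] if i < len(row) else ""
    if cell ≠ "" then p.1 ++ [cell] else p.1)

def build_table_columns_alt (header_rows : List (List String)) (body_rows : List (List String)) : List String :=
  let width : Nat := (header_rows ++ body_rows).foldl (fun w r => if r.length > w then r.length else w) 0
  if width = 0 then []
  else if header_rows = [] then
    (PySem.List.pyRange 1 (Int.ofNat width + 1) 1).map (fun i => "Column " ++ PySem.Int.toStr i)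
  else
    let cols := header_rows.foldl btc_step (List.replicate width [])
    cols.zipIdx.map (fun p =>
      if p.1 ≠ [] then PySem.Str.join " / " p.1
      else "Column " ++ PySem.Int.toStr (Int.ofNat p.2 + 1))

-- ===== PRECONDITION & SPEC =====
def Spec_build_table_columns (header_rows : List (List String)) (body_rows : List (List String)) (out : List String) : Prop := out = build_table_columns_alt header_rows body_rows
instance (header_rows : List (List String)) (body_rows : List (List String)) (out : List String) : Decidable (Spec_build_table_columns header_rows body_rows out) := by unfold Spec_build_table_columns; infer_instance

-- ===== CLAIM (what is proved, stated in full; the proofs are below) =====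
def Claim_equal_build_table_columns : Prop := ∀ (header_rows : List (List String)) (body_rows : List (List String)), Dom_build_table_columns header_rows body_rows → Spec_build_table_columns header_rows body_rows (build_table_columns header_rows body_rows)

-- ===== LEMMAS AND PROOFS =====

-- A's max(..., default=0) equals B's running-max loop
theorem width_eq (l : List Nat) :
    (PySem.List.max? l (fun x => x)).getD 0
      = l.foldl (fun w x => if x > w then x else w) 0 := by
  cases l with
  | nil => simp [PySem.List.max?]
  | cons a t =>
    rw [PySem.List.max?_id_cons]
    have step : ∀ (s : List Nat) (acc : Nat),
        s.foldl max acc = s.foldl (fun w x => if x > w then x else w) acc := by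
      intro s
      induction s with
      | nil => intro acc; rfl
      | cons b s ih =>
        intro acc
        simp only [List.foldl_cons, ih]
        congr 1
        rw [Nat.max_def]; split_ifs <;> omega
    have h0 : (if a > 0 then a else 0) = a := by split_ifs <;> omega
    simp only [List.foldl_cons, h0, step, Option.getD_some]

-- padded row reads like the original row under getD ""
theorem normalizeRow_eq (r : List String) (w : Nat) :
    normalize_row r w = r.take w ++ List.replicate (w - min w r.length) "" := by
  unfold normalize_row
  by_cases h : (r.take w).length < w
  · simp only [if_pos h]; congr 1; simp
  · have : w - min w r.length = 0 := by simp at h; omega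
    simp [this]

theorem normalize_getD (r : List String) (w i : Nat) (hi : i < w) :
    (normalize_row r w).getD i "" = r.getD i "" := by
  rw [normalizeRow_eq]
  simp only [List.getD_eq_getElem?_getD]
  by_cases hir : i < r.length
  · have h1 : i < (r.take w).length := by simp; omega
    rw [List.getElem?_append_left h1]
    simp [hi, hir]
  · have h1 : (r.take w).length ≤ i := by simp; omega
    rw [List.getElem?_append_right h1]
    simp only [List.length_take] at h1
    simp [List.getElem?_replicate, List.getElem?_eq_none (by omega : r.length ≤ i)]
    split_ifs <;> rfl

-- mapping a function over a list tagged with indices, when the list is (range w).map f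
theorem zipIdx_map_range {α β : Type} (w : Nat) (f : Nat → α) (g : α × Nat → β) :
    (((List.range w).map f).zipIdx).map g = (List.range w).map (fun i => g (f i, i)) := by
  apply List.ext_getElem
  · simp
  · intro i h1 h2
    simp

-- B's fold over header rows computes, per column, the filterMap of truthy cells
theorem fold_cols (hr : List (List String)) (w : Nat) :
    ∀ f : Nat → List String,
      hr.foldl btc_step ((List.range w).map f)
        = (List.range w).map (fun i =>
            f i ++ hr.filterMap (fun row =>
              if row.getD i "" ≠ "" then some (row.getD i "") else none)) := by
  induction hr with
  | nil => intro f; simp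
  | cons row hr ih =>
    intro f
    simp only [List.foldl_cons, List.filterMap_cons]
    rw [show btc_step ((List.range w).map f) row
          = (List.range w).map (fun i =>
              (f i ++ if row.getD i "" ≠ "" then [row.getD i ""] else [])) from ?_,
        ih]
    · apply List.map_congr_left
      intro i _
      simp only [List.getD_eq_getElem?_getD]
      by_cases h : row[i]?.getD "" = "" <;> simp [h]
    · unfold btc_step
      rw [zipIdx_map_range]
      apply List.map_congr_left
      intro i _
      simp only [List.getD_eq_getElem?_getD]
      by_cases h : row[i]?.getD "" = "" <;> simp [h]

-- A's per-column comprehension over normalized rows equals the filterMap over the raw rows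
theorem values_eq (hr : List (List String)) (w i : Nat) (hi : i < w) :
    ((hr.map (fun r => normalize_row r w)).filter (fun row => row.getD i "" ≠ "")).map
        (fun row => row.getD i "")
      = hr.filterMap (fun row => if row.getD i "" ≠ "" then some (row.getD i "") else none) := by
  induction hr with
  | nil => rfl
  | cons r hr ih =>
    simp only [List.map_cons, List.filter_cons, List.filterMap_cons]
    have hn := normalize_getD r w i hi
    simp only [List.getD_eq_getElem?_getD] at hn ih ⊢
    by_cases h : r[i]?.getD "" = "" <;> simp [hn, h] <;> simpa using ih

-- appending loop = map
theorem foldl_append_map {α β : Type} (l : List α) (g : α → β) :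
    ∀ acc : List β, l.foldl (fun cols x => cols ++ [g x]) acc = acc ++ l.map g := by
  induction l with
  | nil => intro acc; simp
  | cons a l ih => intro acc; simp [ih]

-- ===== VERDICT (by name: the statement is the Claim_ definition above) =====
theorem build_table_columns_spec : Claim_equal_build_table_columns := by
  intro header_rows body_rows _
  unfold Spec_build_table_columns build_table_columns build_table_columns_alt
  have hwidth : (header_rows ++ body_rows).foldl (fun w r => if r.length > w then r.length else w) 0
      = (PySem.List.max? ((header_rows ++ body_rows).map (fun r => r.length)) (fun x => x)).getD 0 := by
    rw [width_eq, List.foldl_map]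
  rw [hwidth]
  generalize (PySem.List.max? ((header_rows ++ body_rows).map (fun r => r.length)) (fun x => x)).getD 0 = w
  by_cases h0 : w = 0
  · simp [h0]
  · simp only [if_neg h0]
    by_cases hh : header_rows = []
    · simp [hh]
    · simp only [if_neg hh]
      rw [show (List.replicate w ([] : List String)) = (List.range w).map (fun _ => []) by
            simp [List.map_const'],
          fold_cols, zipIdx_map_range, foldl_append_map]
      simp only [List.nil_append]
      apply List.map_congr_left
      intro i hi
      rw [values_eq header_rows w i (List.mem_range.mp hi)]
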